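-- pv_equiv track=rewrite | github.com/FredericaLee/Sleep-Stage-Scoring-with-Single-Channel-EEG-with-CNN- | fileP.py | filelist
-- ===== SOURCE A (Python) =====
-- def filelist(path):
--     # part = ""
--     part = path
--     part0 = "SC4"
--     part41 = "E0-PSG-EegData.txt"
--     part42 ="E0-PSG-EegLabel.txt"
--     part1 = 0
--     part2 = 0
--     part3 = 0
--     name = [[],[]]
--     for i in range(0,40):
--         if (i % 2 == 0 and i != 0):
--             part2 = part2 + 1
--         if (i % 20 == 0 and i != 0):
--             part1 = part1 + 1
--         temp = part+part0+str(part1)+str(part2%10)+str(part3%2+1)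
--         if(str(part1)+str(part2%10)+str(part3%2+1)=="132"):
--             part3 = part3+1
--             continue
--         name[0].append(temp+part41)
--         name[1].append(temp+part42)
--         part3 = part3+1
--     return name
-- ===== SOURCE B (Python) =====
-- def filelist(path):
--     # Enumerate subjects 0..19 and nights 1..2 directly (two-digit subject code),
--     # skipping the non-existent recording SC4132 (subject 13, night 2).
--     data, labels = [], []
--     for subj in range(20):
--         for night in (1, 2):
--             if subj == 13 and night == 2:
--                 continue
--             stem = path + "SC4" + str(subj // 10) + str(subj % 10) + str(night)
--             data.append(stem + "E0-PSG-EegData.txt")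
--             labels.append(stem + "E0-PSG-EegLabel.txt")
--     return [data, labels]
-- ===== Notes on version B (the rewrite author's own statement) =====
-- stated objective: simpler
-- what changed: Replaces the single 40-iteration loop with three threaded digit counters by nested loops over the actual domain objects (subject 0..19, night 1..2), deriving the two-digit subject code from subj and skipping the non-existent recording (subject 13, night 2) by its identity instead of a string comparison.
import Mathlib
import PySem

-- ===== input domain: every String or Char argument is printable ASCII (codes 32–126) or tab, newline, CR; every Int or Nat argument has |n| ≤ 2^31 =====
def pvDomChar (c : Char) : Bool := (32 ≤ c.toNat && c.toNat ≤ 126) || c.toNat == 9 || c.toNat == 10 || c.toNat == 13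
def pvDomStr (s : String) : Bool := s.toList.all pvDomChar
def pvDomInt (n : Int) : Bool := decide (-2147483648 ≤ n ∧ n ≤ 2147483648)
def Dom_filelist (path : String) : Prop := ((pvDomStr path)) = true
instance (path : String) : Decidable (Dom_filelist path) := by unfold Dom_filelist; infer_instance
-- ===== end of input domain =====

-- B enumerates the domain objects (subject 0..19 x night 1..2) with nested loops, skipping
-- the non-existent recording (subject 13, night 2), instead of A's single 40-step loop
-- with three threaded digit counters (objective: simpler).

-- ===== PORT A =====
-- loop body of A, factored as a helper (part = the 'part' variable, i.e. path)
def filelistStep (part : String) (st : Int × Int × Int × List String × List String) (i : Int) :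
    Int × Int × Int × List String × List String :=
  let part0 := "SC4"
  let part41 := "E0-PSG-EegData.txt"
  let part42 := "E0-PSG-EegLabel.txt"
  let part1 := st.1
  let part2 := st.2.1
  let part3 := st.2.2.1
  let n0 := st.2.2.2.1
  let n1 := st.2.2.2.2
  let part2 := if PySem.Int.mod i 2 = 0 ∧ i ≠ 0 then part2 + 1 else part2
  let part1 := if PySem.Int.mod i 20 = 0 ∧ i ≠ 0 then part1 + 1 else part1
  let temp := part ++ part0 ++ PySem.Int.toStr part1 ++ PySem.Int.toStr (PySem.Int.mod part2 10)
                ++ PySem.Int.toStr (PySem.Int.mod part3 2 + 1)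
  if PySem.Int.toStr part1 ++ PySem.Int.toStr (PySem.Int.mod part2 10)
       ++ PySem.Int.toStr (PySem.Int.mod part3 2 + 1) = "132" then
    (part1, part2, part3 + 1, n0, n1)
  else
    (part1, part2, part3 + 1, n0 ++ [temp ++ part41], n1 ++ [temp ++ part42])

def filelist (path : String) : List (List String) :=
  let st := (PySem.List.pyRange 0 40 1).foldl (filelistStep path) (0, 0, 0, [], [])
  [st.2.2.2.1, st.2.2.2.2]

-- ===== PORT B =====
-- inner loop body of B: one (subject, night) pair
def filelistAltNight (path : String) (subj : Int) (acc : List String × List String)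
    (night : Int) : List String × List String :=
  if subj = 13 ∧ night = 2 then acc
  else
    let stem := path ++ "SC4" ++ PySem.Int.toStr (PySem.Int.floordiv subj 10)
      ++ PySem.Int.toStr (PySem.Int.mod subj 10) ++ PySem.Int.toStr night
    (acc.1 ++ [stem ++ "E0-PSG-EegData.txt"], acc.2 ++ [stem ++ "E0-PSG-EegLabel.txt"])

def filelist_alt (path : String) : List (List String) :=
  let st := (PySem.List.pyRange 0 20 1).foldl
    (fun acc subj => ([1, 2] : List Int).foldl (filelistAltNight path subj) acc) ([], [])
  [st.1, st.2]

-- ===== PRECONDITION & SPEC =====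
def Spec_filelist (path : String) (out : List (List String)) : Prop := out = filelist_alt path
instance (path : String) (out : List (List String)) : Decidable (Spec_filelist path out) := by unfold Spec_filelist; infer_instance

-- ===== CLAIM (what is proved, stated in full; the proofs are below) =====
def Claim_equal_filelist : Prop := ∀ (path : String), Dom_filelist path → Spec_filelist path (filelist path)

-- ===== LEMMAS AND PROOFS =====

-- path factors out of A's fold: the fold for `path` is the fold for "" with every
-- collected name prefixed by path (the counters do not depend on path).
theorem filelistStep_factor (path : String) (l : List Int)
    (p1 p2 p3 : Int) (m0 m1 : List String) :
    l.foldl (filelistStep path) (p1, p2, p3, m0.map (fun s => path ++ s), m1.map (fun s => path ++ s))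
      = ((l.foldl (filelistStep "") (p1, p2, p3, m0, m1)).1,
         (l.foldl (filelistStep "") (p1, p2, p3, m0, m1)).2.1,
         (l.foldl (filelistStep "") (p1, p2, p3, m0, m1)).2.2.1,
         (l.foldl (filelistStep "") (p1, p2, p3, m0, m1)).2.2.2.1.map (fun s => path ++ s),
         (l.foldl (filelistStep "") (p1, p2, p3, m0, m1)).2.2.2.2.map (fun s => path ++ s)) := by
  induction l generalizing p1 p2 p3 m0 m1 with
  | nil => simp
  | cons i l ih =>
    simp only [List.foldl_cons]
    rw [show filelistStep path (p1, p2, p3, m0.map (fun s => path ++ s), m1.map (fun s => path ++ s)) i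
          = (let st := filelistStep "" (p1, p2, p3, m0, m1) i
             (st.1, st.2.1, st.2.2.1, st.2.2.2.1.map (fun s => path ++ s),
              st.2.2.2.2.map (fun s => path ++ s))) from ?_]
    · exact ih _ _ _ _ _
    · unfold filelistStep
      split_ifs <;>
        simp only [apply_ite, List.map_append, List.map_cons, List.map_nil] <;>
        split_ifs <;>
        simp [String.append_assoc]

theorem filelist_factor (path : String) :
    filelist path = (filelist "").map (List.map (fun s => path ++ s)) := by
  have h := filelistStep_factor path (PySem.List.pyRange 0 40 1) 0 0 0 [] []
  simp only [List.map_nil] at h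
  simp [filelist, h]

-- same factorisation for B's inner step
theorem filelistAltNight_factor (path : String) (subj night : Int) (m0 m1 : List String) :
    filelistAltNight path subj (m0.map (fun s => path ++ s), m1.map (fun s => path ++ s)) night
      = ((filelistAltNight "" subj (m0, m1) night).1.map (fun s => path ++ s),
         (filelistAltNight "" subj (m0, m1) night).2.map (fun s => path ++ s)) := by
  unfold filelistAltNight
  split_ifs <;> simp [String.append_assoc]

theorem filelistAlt_factor_fold (path : String) (l : List (Int × Int)) (m0 m1 : List String) :
    l.foldl (fun acc p => filelistAltNight path p.1 acc p.2)
        (m0.map (fun s => path ++ s), m1.map (fun s => path ++ s))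
      = ((l.foldl (fun acc p => filelistAltNight "" p.1 acc p.2) (m0, m1)).1.map (fun s => path ++ s),
         (l.foldl (fun acc p => filelistAltNight "" p.1 acc p.2) (m0, m1)).2.map (fun s => path ++ s)) := by
  induction l generalizing m0 m1 with
  | nil => simp
  | cons p l ih =>
    simp only [List.foldl_cons]
    rw [filelistAltNight_factor]
    have := ih (filelistAltNight "" p.1 (m0, m1) p.2).1 (filelistAltNight "" p.1 (m0, m1) p.2).2
    simpa using this

-- the nested fold is a fold over the flattened (subject, night) pairs
theorem filelistAlt_nested_flat (path : String) (l : List Int) (acc : List String × List String) :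
    l.foldl (fun acc subj => ([1, 2] : List Int).foldl (filelistAltNight path subj) acc) acc
      = (l.flatMap (fun subj => [(subj, (1 : Int)), (subj, 2)])).foldl
          (fun acc p => filelistAltNight path p.1 acc p.2) acc := by
  induction l generalizing acc with
  | nil => rfl
  | cons s l ih =>
    simp only [List.flatMap_cons, List.cons_append, List.nil_append, List.foldl_cons]
    exact ih _

theorem filelist_alt_factor (path : String) :
    filelist_alt path = (filelist_alt "").map (List.map (fun s => path ++ s)) := by
  unfold filelist_alt
  simp only [filelistAlt_nested_flat]
  have h := filelistAlt_factor_fold path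
    ((PySem.List.pyRange 0 20 1).flatMap (fun subj => [(subj, (1 : Int)), (subj, 2)])) [] []
  simp only [List.map_nil] at h
  simp [h]

set_option maxRecDepth 100000 in
set_option maxHeartbeats 1000000 in
theorem core_eq : filelist "" = filelist_alt "" := by decide

-- ===== VERDICT (by name: the statement is the Claim_ definition above) =====
theorem filelist_spec : Claim_equal_filelist := by
  intro path _
  unfold Spec_filelist
  rw [filelist_factor, filelist_alt_factor, core_eq]
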